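-- pv_equiv track=rewrite | github.com/leoam/coder_sw_decoder_hw | Benchmarks/parallel-sequitur-master/serial/serial.py | non_overlap
-- ===== SOURCE A (Python) =====
-- def non_overlap(list_of_ranges, target_range):
--     t1, t2 = target_range
--     overlapping_ranges = []
--     for x in list_of_ranges:
--         a,b = x
--         if not (list(set(range(a,b)) & set(range(t1,t2))) != []):
--             overlapping_ranges.append(x)
--     return overlapping_ranges
-- ===== SOURCE B (Python) =====
-- def non_overlap(list_of_ranges, target_range):
--     t1, t2 = target_range
--     return [x for x in list_of_ranges
--             if not (x[0] < x[1] and t1 < t2 and x[0] < t2 and t1 < x[1])]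
-- ===== Notes on version B (the rewrite author's own statement) =====
-- stated objective: faster
-- what changed: Replaced materialising both ranges as sets and intersecting them with a constant-time arithmetic interval-overlap test inside a single filter comprehension.
import Mathlib
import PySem

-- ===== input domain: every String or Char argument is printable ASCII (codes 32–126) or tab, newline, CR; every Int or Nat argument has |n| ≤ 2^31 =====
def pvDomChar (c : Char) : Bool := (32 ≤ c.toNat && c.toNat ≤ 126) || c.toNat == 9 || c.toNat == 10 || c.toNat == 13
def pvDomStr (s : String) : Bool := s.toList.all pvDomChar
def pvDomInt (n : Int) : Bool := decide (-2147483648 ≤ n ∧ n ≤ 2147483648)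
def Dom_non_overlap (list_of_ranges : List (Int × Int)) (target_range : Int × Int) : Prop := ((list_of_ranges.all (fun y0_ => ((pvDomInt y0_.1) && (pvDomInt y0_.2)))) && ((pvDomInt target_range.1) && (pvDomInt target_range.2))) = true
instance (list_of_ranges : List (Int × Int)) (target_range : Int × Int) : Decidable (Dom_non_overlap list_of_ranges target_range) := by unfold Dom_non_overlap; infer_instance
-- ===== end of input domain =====

-- B replaces A's materialised range-set intersection by an O(1) arithmetic overlap test (objective: faster).

-- ===== PORT A =====
def non_overlap (list_of_ranges : List (Int × Int)) (target_range : Int × Int) : List (Int × Int) :=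
  let t1 := target_range.1
  let t2 := target_range.2
  list_of_ranges.foldl (fun overlapping_ranges x =>
    let a := x.1
    let b := x.2
    -- set(range(a,b)) & set(range(t1,t2)): range yields distinct elements and membership of k
    -- in set(range(t1,t2)) is exactly t1 ≤ k < t2 (PySem.List.mem_pyRange_one); only the
    -- EMPTINESS of the intersection is consumed, so this per-element filter is exact here.
    if ¬ (((PySem.List.pyRange a b 1).filter (fun k => decide (t1 ≤ k ∧ k < t2))) ≠ []) then
      overlapping_ranges ++ [x]
    else overlapping_ranges) []

-- ===== PORT B =====
def non_overlap_alt (list_of_ranges : List (Int × Int)) (target_range : Int × Int) : List (Int × Int) :=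
  let t1 := target_range.1
  let t2 := target_range.2
  list_of_ranges.filter (fun x => !(x.1 < x.2 && t1 < t2 && x.1 < t2 && t1 < x.2))

-- ===== PRECONDITION & SPEC =====
def Spec_non_overlap (list_of_ranges : List (Int × Int)) (target_range : Int × Int) (out : List (Int × Int)) : Prop := out = non_overlap_alt list_of_ranges target_range
instance (list_of_ranges : List (Int × Int)) (target_range : Int × Int) (out : List (Int × Int)) : Decidable (Spec_non_overlap list_of_ranges target_range out) := by unfold Spec_non_overlap; infer_instance

-- ===== CLAIM (what is proved, stated in full; the proofs are below) =====
def Claim_equal_non_overlap : Prop := ∀ (list_of_ranges : List (Int × Int)) (target_range : Int × Int), Dom_non_overlap list_of_ranges target_range → Spec_non_overlap list_of_ranges target_range (non_overlap list_of_ranges target_range)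

-- ===== LEMMAS AND PROOFS =====

-- the materialised intersection of the two ranges is empty iff the intervals do not arithmetically overlap
theorem pv_inter_empty_iff (a b t1 t2 : Int) :
    ((PySem.List.pyRange a b 1).filter (fun k => decide (t1 ≤ k ∧ k < t2)) = []) ↔
      ¬ (a < b ∧ t1 < t2 ∧ a < t2 ∧ t1 < b) := by
  rw [List.eq_nil_iff_forall_not_mem]
  constructor
  · intro h hc
    exact h (max a t1) (by
      rw [List.mem_filter, PySem.List.mem_pyRange_one]
      constructor
      · omega
      · simp; omega)
  · intro h k hk
    rw [List.mem_filter, PySem.List.mem_pyRange_one] at hk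
    obtain ⟨h1, h2⟩ := hk
    simp at h2
    exact h ⟨by omega, by omega, by omega, by omega⟩

-- ===== VERDICT (by name: the statement is the Claim_ definition above) =====
theorem non_overlap_spec : Claim_equal_non_overlap := by
  intro lor tr _
  unfold Spec_non_overlap non_overlap non_overlap_alt
  rw [PySem.List.foldl_append_ite_eq_filter, List.nil_append]
  apply List.filter_congr
  intro x _
  simp only [ne_eq, not_not, pv_inter_empty_iff x.1 x.2 tr.1 tr.2]
  by_cases h : x.1 < x.2 ∧ tr.1 < tr.2 ∧ x.1 < tr.2 ∧ tr.1 < x.2 <;> simp [h] <;> omega
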